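-- pv_equiv track=rewrite | github.com/tru17189/Compilador | proyecto3/GetReg_1.py | ReturnOrGoto
-- ===== SOURCE A (Python) =====
-- tabs = "\t"
--
-- def ReturnOrGoto(LINEA_ACTUAL, LINEA_ACTUAL_PLANO, send_final):
--     word = ""
--     word2 = ""
--     if "goto" in LINEA_ACTUAL_PLANO:
--         for u in LINEA_ACTUAL_PLANO:
--             word += u
--             if "goto " in word:
--                 if u == " ":
--                     pass
--                 else:
--                     word2 += u
--             else:
--                 pass
--         send_final.append("\n%sjal %s" % (tabs, word2))
--     elif "return" in LINEA_ACTUAL_PLANO: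
--         for u in LINEA_ACTUAL_PLANO:
--             word += u
--             if "return " in word:
--                 if u == " ":
--                     pass
--                 else:
--                     word2 += u
--             else:
--                 pass
--         send_final.append("\n%sjr $ra" % tabs)
--
--     return send_final
-- ===== SOURCE B (Python) =====
-- tabs = "\t"
--
-- def ReturnOrGoto(LINEA_ACTUAL, LINEA_ACTUAL_PLANO, send_final):
--     if "goto" in LINEA_ACTUAL_PLANO:
--         i = LINEA_ACTUAL_PLANO.find("goto ")
--         target = "" if i < 0 else LINEA_ACTUAL_PLANO[i + 5:].replace(" ", "")
--         send_final.append("\n%sjal %s" % (tabs, target))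
--     elif "return" in LINEA_ACTUAL_PLANO:
--         send_final.append("\n%sjr $ra" % tabs)
--     return send_final
-- ===== Notes on version B (the rewrite author's own statement) =====
-- stated objective: simpler
-- what changed: B replaces A's char-by-char accumulation loops by a direct computation: the goto target is the substring after the first 'goto ' (via str.find and a slice) with spaces removed by replace, and the return branch appends its constant line with no loop at all (A's loop result there is dead).
import Mathlib
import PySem

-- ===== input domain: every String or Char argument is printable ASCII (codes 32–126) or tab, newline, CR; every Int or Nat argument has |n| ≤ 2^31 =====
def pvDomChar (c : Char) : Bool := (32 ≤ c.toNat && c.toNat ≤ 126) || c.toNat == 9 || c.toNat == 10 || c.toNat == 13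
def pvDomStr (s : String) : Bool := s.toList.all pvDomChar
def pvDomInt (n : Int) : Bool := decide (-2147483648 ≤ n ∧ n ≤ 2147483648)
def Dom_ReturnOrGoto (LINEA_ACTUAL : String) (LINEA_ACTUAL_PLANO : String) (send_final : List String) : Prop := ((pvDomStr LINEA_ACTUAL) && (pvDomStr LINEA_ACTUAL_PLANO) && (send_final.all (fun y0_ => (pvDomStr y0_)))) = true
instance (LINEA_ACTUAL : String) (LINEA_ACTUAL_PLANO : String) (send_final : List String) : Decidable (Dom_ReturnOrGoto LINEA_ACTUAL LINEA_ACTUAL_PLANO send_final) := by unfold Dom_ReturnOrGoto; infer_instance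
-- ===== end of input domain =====

-- B computes the goto target directly (find + slice + replace) instead of A's char-by-char
-- accumulation loops, and appends the constant return line without A's dead loop (simpler);
-- both versions extend send_final by the same one element (Python mutates it in place).

-- ===== PORT A =====
def tabsPy : String := "\t"

-- one step of A's `for u in LINEA_ACTUAL_PLANO` loop, state = (word, word2)
def gotoStepA (st : List Char × List Char) (u : Char) : List Char × List Char :=
  let word := st.1 ++ [u]
  (word, if PySem.Chars.isIn "goto ".toList word then
           (if u == ' ' then st.2 else st.2 ++ [u])
         else st.2)

def retStepA (st : List Char × List Char) (u : Char) : List Char × List Char :=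
  let word := st.1 ++ [u]
  (word, if PySem.Chars.isIn "return ".toList word then
           (if u == ' ' then st.2 else st.2 ++ [u])
         else st.2)

def ReturnOrGoto (LINEA_ACTUAL : String) (LINEA_ACTUAL_PLANO : String) (send_final : List String) : List String :=
  if PySem.Str.isIn "goto" LINEA_ACTUAL_PLANO then
    let st := LINEA_ACTUAL_PLANO.toList.foldl gotoStepA ([], [])
    send_final ++ ["\n" ++ tabsPy ++ "jal " ++ String.ofList st.2]
  else if PySem.Str.isIn "return" LINEA_ACTUAL_PLANO then
    let _st := LINEA_ACTUAL_PLANO.toList.foldl retStepA ([], [])  -- A runs this loop; its result is unused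
    send_final ++ ["\n" ++ tabsPy ++ "jr $ra"]
  else send_final

-- ===== PORT B =====
def ReturnOrGoto_alt (LINEA_ACTUAL : String) (LINEA_ACTUAL_PLANO : String) (send_final : List String) : List String :=
  if PySem.Str.isIn "goto" LINEA_ACTUAL_PLANO then
    let i := PySem.Str.find LINEA_ACTUAL_PLANO "goto "
    let target := if i < 0 then "" else
      PySem.Str.replace (PySem.Str.slice LINEA_ACTUAL_PLANO (some (i + 5)) none) " " ""
    send_final ++ ["\n" ++ tabsPy ++ "jal " ++ target]
  else if PySem.Str.isIn "return" LINEA_ACTUAL_PLANO then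
    send_final ++ ["\n" ++ tabsPy ++ "jr $ra"]
  else send_final

-- ===== PRECONDITION & SPEC =====
def Spec_ReturnOrGoto (LINEA_ACTUAL : String) (LINEA_ACTUAL_PLANO : String) (send_final : List String) (out : List String) : Prop := out = ReturnOrGoto_alt LINEA_ACTUAL LINEA_ACTUAL_PLANO send_final
instance (LINEA_ACTUAL : String) (LINEA_ACTUAL_PLANO : String) (send_final : List String) (out : List String) : Decidable (Spec_ReturnOrGoto LINEA_ACTUAL LINEA_ACTUAL_PLANO send_final out) := by unfold Spec_ReturnOrGoto; infer_instance

-- ===== CLAIM (what is proved, stated in full; the proofs are below) =====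
def Claim_equal_ReturnOrGoto : Prop := ∀ (LINEA_ACTUAL : String) (LINEA_ACTUAL_PLANO : String) (send_final : List String), Dom_ReturnOrGoto LINEA_ACTUAL LINEA_ACTUAL_PLANO send_final → Spec_ReturnOrGoto LINEA_ACTUAL LINEA_ACTUAL_PLANO send_final (ReturnOrGoto LINEA_ACTUAL LINEA_ACTUAL_PLANO send_final)

-- ===== LEMMAS AND PROOFS =====

-- the value A's goto loop leaves in word2, characterised via Chars.find
def gotoTail (s : List Char) : List Char :=
  if 0 ≤ PySem.Chars.find s "goto ".toList then
    (s.drop ((PySem.Chars.find s "goto ".toList).toNat + 4)).filter (fun c => c != ' ')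
  else []

-- `replace " " ""` is `filter (· ≠ ' ')`
theorem replace_go_space (fuel : Nat) : ∀ (l acc : List Char), l.length ≤ fuel →
    PySem.Chars.replace.go [' '] [] fuel l acc = acc.reverse ++ l.filter (fun c => c != ' ') := by
  induction fuel with
  | zero =>
    intro l acc h
    have : l = [] := List.eq_nil_of_length_eq_zero (Nat.le_zero.mp h)
    subst this; simp [PySem.Chars.replace.go]
  | succ n ih =>
    intro l acc h
    cases l with
    | nil => simp [PySem.Chars.replace.go]
    | cons c t =>
      simp only [List.length_cons] at h
      by_cases hc : c = ' '
      · subst hc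
        show PySem.Chars.replace.go [' '] [] n t acc = _
        rw [ih t acc (by omega)]
        simp
      · have hpref : ([' '] : List Char).isPrefixOf (c :: t) = false := by
          simp [List.isPrefixOf]; exact fun h' => (hc h'.symm).elim
        show (if ([' '] : List Char).isPrefixOf (c :: t) = true
              then PySem.Chars.replace.go [' '] [] n (List.drop 1 (c :: t)) ([].reverse ++ acc)
              else PySem.Chars.replace.go [' '] [] n t (c :: acc)) = _
        rw [if_neg (by simp [hpref])]
        rw [ih t (c :: acc) (by omega)]
        simp [hc]

theorem replace_space (l : List Char) :
    PySem.Chars.replace l [' '] [] = l.filter (fun c => c != ' ') := by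
  unfold PySem.Chars.replace
  simp only [List.isEmpty_iff, reduceCtorEq, if_false]
  simpa using replace_go_space l.length l [] le_rfl

-- find is unchanged by appending one char once the pattern has already been found
theorem find_concat_of_found (p : List Char) (sub : List Char) (u : Char)
    (h : 0 ≤ PySem.Chars.find p sub) :
    PySem.Chars.find (p ++ [u]) sub = PySem.Chars.find p sub := by
  obtain ⟨hpre, hmin⟩ := PySem.Chars.find_spec h
  set k := (PySem.Chars.find p sub).toNat with hk
  have hkle : k ≤ p.length := by
    have := PySem.Chars.find_le_length p sub
    omega
  have hlen : sub.length ≤ p.length - k := by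
    have := hpre.length_le
    simp at this
    omega
  have hocc : sub <+: (p ++ [u]).drop k := by
    rw [List.drop_append_of_le_length hkle]
    exact hpre.trans (List.prefix_append _ _)
  have hnone : ∀ i < k, ¬ sub <+: (p ++ [u]).drop i := by
    intro i hi hcon
    apply hmin i hi
    rw [List.drop_append_of_le_length (by omega)] at hcon
    have hle : sub.length ≤ (p.drop i).length := by
      simp; omega
    rw [List.prefix_iff_eq_take] at hcon ⊢
    rwa [List.take_append_of_le_length hle] at hcon
  have h0 : 0 ≤ PySem.Chars.find (p ++ [u]) sub := by
    rw [PySem.Chars.find_nonneg_iff]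
    exact hocc.isInfix.trans (List.drop_suffix k _).isInfix
  obtain ⟨hpre', hmin'⟩ := PySem.Chars.find_spec h0
  set k' := (PySem.Chars.find (p ++ [u]) sub).toNat with hk'
  have : k' = k := by
    rcases Nat.lt_trichotomy k' k with hlt | heq | hgt
    · exact absurd hpre' (hnone k' hlt)
    · exact heq
    · exact absurd hocc (hmin' k hgt)
  omega

-- step lemma: how gotoTail evolves when one character is appended
theorem gotoTail_concat (p : List Char) (u : Char) :
    gotoTail (p ++ [u]) =
      (if PySem.Chars.isIn "goto ".toList (p ++ [u]) then
        (if u == ' ' then gotoTail p else gotoTail p ++ [u])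
       else gotoTail p) := by
  by_cases hp : 0 ≤ PySem.Chars.find p "goto ".toList
  · -- already found in p
    have hfind := find_concat_of_found p "goto ".toList u hp
    obtain ⟨hpre, _⟩ := PySem.Chars.find_spec hp
    set k := (PySem.Chars.find p "goto ".toList).toNat with hk
    have hkle : k ≤ p.length := by
      have := PySem.Chars.find_le_length p "goto ".toList
      omega
    have hk5 : k + 5 ≤ p.length := by
      have := hpre.length_le
      simp at this
      omega
    have hin : PySem.Chars.isIn "goto ".toList (p ++ [u]) = true := by
      rw [PySem.Chars.isIn_iff_infix]
      exact (hpre.isInfix.trans (List.drop_suffix k p).isInfix).trans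
        (List.prefix_append p [u]).isInfix
    rw [if_pos hin]
    unfold gotoTail
    rw [hfind, if_pos hp, if_pos hp, ← hk,
        List.drop_append_of_le_length (show k + 4 ≤ p.length by omega),
        List.filter_append]
    by_cases hu : u = ' ' <;> simp [hu]
  · -- not yet found in p
    have hpneg : PySem.Chars.find p "goto ".toList = -1 := by
      have := PySem.Chars.neg_one_le_find p "goto ".toList
      omega
    have hGp : gotoTail p = [] := by unfold gotoTail; rw [if_neg hp]
    by_cases h2 : 0 ≤ PySem.Chars.find (p ++ [u]) "goto ".toList
    · -- the occurrence is completed by u, so u = ' '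
      obtain ⟨hpre', hmin'⟩ := PySem.Chars.find_spec h2
      set k' := (PySem.Chars.find (p ++ [u]) "goto ".toList).toNat with hk'
      have hkle' : k' ≤ p.length + 1 := by
        have h1 := PySem.Chars.find_le_length (p ++ [u]) "goto ".toList
        have h2' : (p ++ [u]).length = p.length + 1 := by simp
        omega
      have hlen' : k' + 5 ≤ p.length + 1 := by
        have := hpre'.length_le
        simp at this
        omega
      have hend : k' + 5 = p.length + 1 := by
        by_contra hne
        have hin_p : "goto ".toList <+: p.drop k' := by
          have hcon := hpre'
          rw [List.drop_append_of_le_length (by omega)] at hcon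
          have hle : ("goto ".toList).length ≤ (p.drop k').length := by
            simp; omega
          rw [List.prefix_iff_eq_take] at hcon ⊢
          rwa [List.take_append_of_le_length hle] at hcon
        have : 0 ≤ PySem.Chars.find p "goto ".toList := by
          rw [PySem.Chars.find_nonneg_iff]
          exact hin_p.isInfix.trans (List.drop_suffix k' p).isInfix
        exact hp this
      have hdropEq : (p ++ [u]).drop k' = p.drop k' ++ [u] :=
        List.drop_append_of_le_length (by omega)
      have hG : "goto ".toList = List.drop k' (p ++ [u]) := by
        apply hpre'.eq_of_length
        simp
        omega
      have hu : u = ' ' := by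
        have h : "goto ".toList = List.drop k' p ++ [u] := by rw [hG, hdropEq]
        have h2'' : some ' ' = some u := by
          rw [show (some ' ' : Option Char) = "goto ".toList.getLast? from rfl, h,
              List.getLast?_concat]
        exact (Option.some_inj.mp h2'').symm
      have hin : PySem.Chars.isIn "goto ".toList (p ++ [u]) = true := by
        rw [PySem.Chars.isIn_iff_infix, ← PySem.Chars.find_nonneg_iff]
        exact h2
      rw [if_pos hin, if_pos (by simp [hu]), hGp]
      unfold gotoTail
      rw [if_pos h2, ← hk']
      have h4 : k' + 4 = p.length := by omega
      rw [h4, show List.drop p.length (p ++ [u]) = [u] from by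
            simpa using List.drop_left (l₁ := p) (l₂ := [u])]
      simp [hu]
    · -- still not found
      have hin : PySem.Chars.isIn "goto ".toList (p ++ [u]) = false := by
        rw [PySem.Chars.isIn_eq_false_iff, ← PySem.Chars.find_nonneg_iff]
        exact h2
      rw [if_neg (show ¬ (PySem.Chars.isIn "goto ".toList (p ++ [u]) = true) from by
            simp only [hin]; exact Bool.false_ne_true)]
      unfold gotoTail
      rw [if_neg h2, if_neg hp]

-- invariant of A's goto loop: word = processed prefix, word2 = gotoTail of it
theorem foldA_eq (s : List Char) :
    s.foldl gotoStepA ([], []) = (s, gotoTail s) := by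
  induction s using List.reverseRecOn with
  | nil =>
    simp [gotoTail]
  | append_singleton p u ih =>
    rw [List.foldl_append, ih]
    show gotoStepA (p, gotoTail p) u = (p ++ [u], gotoTail (p ++ [u]))
    rw [gotoTail_concat]
    rfl

-- B's target string equals what A's loop leaves in word2
theorem target_eq (s : String) :
    (if PySem.Str.find s "goto " < 0 then "" else
      PySem.Str.replace (PySem.Str.slice s (some (PySem.Str.find s "goto " + 5)) none) " " "")
    = String.ofList (gotoTail s.toList) := by
  by_cases hf : PySem.Str.find s "goto " < 0
  · rw [if_pos hf]
    have hneg : ¬ 0 ≤ PySem.Chars.find s.toList "goto ".toList := by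
      rw [← PySem.Str.find_eq]; omega
    unfold gotoTail
    rw [if_neg hneg]
  · rw [if_neg hf]
    have h0 : 0 ≤ PySem.Chars.find s.toList "goto ".toList := by
      rw [← PySem.Str.find_eq]; omega
    obtain ⟨hpre, _⟩ := PySem.Chars.find_spec h0
    set k := (PySem.Chars.find s.toList "goto ".toList).toNat with hk
    obtain ⟨t, ht⟩ := hpre
    have hcast : PySem.Str.find s "goto " + 5 = ((k + 5 : Nat) : Int) := by
      rw [PySem.Str.find_eq]; omega
    have h4 : s.toList.drop (k + 4) = ' ' :: t := by
      rw [← List.drop_drop (i := 4) (j := k), ← ht]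
      rfl
    have h5 : s.toList.drop (k + 5) = t := by
      rw [← List.drop_drop (i := 5) (j := k), ← ht]
      rfl
    have key : (PySem.Str.replace (PySem.Str.slice s (some (PySem.Str.find s "goto " + 5)) none) " " "").toList
        = gotoTail s.toList := by
      rw [PySem.Str.toList_replace, PySem.Str.toList_slice, hcast]
      have hsl : PySem.Chars.slice s.toList (some ((k + 5 : Nat) : Int)) none
          = s.toList.drop (k + 5) := by
        rw [PySem.Chars.slice_eq_listSlice]
        exact PySem.List.slice_from_natCast s.toList (k + 5)
      rw [hsl, show (" ".toList : List Char) = [' '] from rfl,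
          show ("".toList : List Char) = [] from rfl, replace_space]
      unfold gotoTail
      rw [if_pos h0, ← hk, h4, h5]
      simp
    rw [← key, String.ofList_toList]

-- ===== VERDICT (by name: the statement is the Claim_ definition above) =====
theorem ReturnOrGoto_spec : Claim_equal_ReturnOrGoto := by
  intro LA LP sf _
  unfold Spec_ReturnOrGoto ReturnOrGoto ReturnOrGoto_alt
  by_cases hg : PySem.Str.isIn "goto" LP
  · rw [if_pos hg, if_pos hg]
    simp only [foldA_eq, ← target_eq]
  · rw [if_neg hg, if_neg hg]  -- the return and fall-through branches agree definitionally
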